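-- pv_equiv track=rewrite | github.com/O-ELMA/subgen | main.py | _fix_trailing_orphans
-- ===== SOURCE A (Python) =====
-- ORPHAN_WORDS = frozenset({
--     # Articles & Basic Prepositions
--     "the","a","an","of","in","to","for","on","at","by","with","from","into","upon","about","above","after","against","along","among","around","before","behind","below","beneath","beside","between","beyond","down","during","except","inside","near","off","out","outside","over","through","under","until","without",
--     # Conjunctions
--     "and","but","not","so","or","if","as","than","then","because","since","although","though","unless","while","where","when","why","how",
--     # Pronouns & Determiners
--     "it","its","that","this","these","those","they","he","she","we","you","me","him","her","us","them","my","your","yours","our","ours","their","theirs","whose","which","what","some","any","every","all","both","neither","either","no",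
--     # Verbs (Auxiliary & To Be)
--     "is","are","was","were","am","be","been","being","do","did","does","has","had","have",
--     # Modals
--     "can","could","shall","should","will","would","may","might","must",
--     # Contractions
--     "it's","i'm","don't","won't","can't","isn't","aren't","you're","he's","she's","we're","they're","i've","you've","we've","they've","i'll","you'll","he'll","she'll","we'll","they'll","i'd","you'd","he'd","she'd","we'd","they'd","that's","who's","what's","where's","there's","here's","couldn't","shouldn't","wouldn't","hasn't","haven't","hadn't","doesn't","didn't","wasn't","weren't",
--     # Arabic Connectors, Prepositions, and Pronouns
--     "في","من","إلى","على","عن","و","ف","ب","ل","ك","ال","هل","لم","لن","قد","ما","أن","إن","هو","هي","هم",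
--     "أو","ثم","حتى","لكن","بين","مع","عند","مثل","هذا","هذه","ذلك","تلك","كل","بعض","غير","إلا"
-- })
--
-- def _is_orphan(word):
--     clean = word.strip('",.!?;:()\'"…').lower()
--     return clean in ORPHAN_WORDS
--
-- def _fix_trailing_orphans(blocks, words):
--     if len(blocks) <= 1:
--         return blocks
--
--     for i in range(len(blocks) - 2, -1, -1):
--         while len(blocks[i]) > 1 and _is_orphan(words[blocks[i][-1]]["text"]):
--             orphan = blocks[i].pop()
--             blocks[i + 1].insert(0, orphan)
--
--     return [b for b in blocks if b]
-- ===== SOURCE B (Python) =====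
-- ORPHAN_WORDS = frozenset(
--     "the a an of in to for on at by with from into upon about above after against along among around before behind below beneath beside between beyond down during except inside near off out outside over through under until without and but not so or if as than then because since although though unless while where when why how it its that this these those they he she we you me him her us them my your yours our ours their theirs whose which what some any every all both neither either no is are was were am be been being do did does has had have can could shall should will would may might must it's i'm don't won't can't isn't aren't you're he's she's we're they're i've you've we've they've i'll you'll he'll she'll we'll they'll i'd you'd he'd she'd we'd they'd that's who's what's where's there's here's couldn't shouldn't wouldn't hasn't haven't hadn't doesn't didn't wasn't weren't في من إلى على عن و ف ب ل ك ال هل لم لن قد ما أن إن هو هي هم أو ثم حتى لكن بين مع عند مثل هذا هذه ذلك تلك كل بعض غير إلا".split()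
-- )
--
-- def _is_orphan(word):
--     clean = word.strip('",.!?;:()\'"…').lower()
--     return clean in ORPHAN_WORDS
--
-- def _shift(moved, blocks, words):
--     # forward recursion: split each non-last block at the start of its maximal
--     # trailing orphan run (never before index 1), prepend what the previous
--     # block moved down.
--     if len(blocks) == 1:
--         return [moved + blocks[0]]
--     b = blocks[0]
--     s = len(b)
--     while s > 1 and _is_orphan(words[b[s - 1]]["text"]):
--         s -= 1
--     return [moved + b[:s]] + _shift(b[s:], blocks[1:], words)
--
-- def _fix_trailing_orphans(blocks, words):
--     if len(blocks) <= 1: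
--         return blocks
--     return [b for b in _shift([], blocks, words) if b]
-- ===== Notes on version B (the rewrite author's own statement) =====
-- stated objective: simpler
-- what changed: A walks the block indices backward, repeatedly popping a trailing orphan off blocks[i] and inserting it at the front of blocks[i+1] in place; B is a single forward recursion that splits each non-last block at the start of its maximal trailing orphan run (never before index 1) and prepends the moved suffix to the next block, building new lists (and builds the orphan-word set by splitting one string).
import Mathlib
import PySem

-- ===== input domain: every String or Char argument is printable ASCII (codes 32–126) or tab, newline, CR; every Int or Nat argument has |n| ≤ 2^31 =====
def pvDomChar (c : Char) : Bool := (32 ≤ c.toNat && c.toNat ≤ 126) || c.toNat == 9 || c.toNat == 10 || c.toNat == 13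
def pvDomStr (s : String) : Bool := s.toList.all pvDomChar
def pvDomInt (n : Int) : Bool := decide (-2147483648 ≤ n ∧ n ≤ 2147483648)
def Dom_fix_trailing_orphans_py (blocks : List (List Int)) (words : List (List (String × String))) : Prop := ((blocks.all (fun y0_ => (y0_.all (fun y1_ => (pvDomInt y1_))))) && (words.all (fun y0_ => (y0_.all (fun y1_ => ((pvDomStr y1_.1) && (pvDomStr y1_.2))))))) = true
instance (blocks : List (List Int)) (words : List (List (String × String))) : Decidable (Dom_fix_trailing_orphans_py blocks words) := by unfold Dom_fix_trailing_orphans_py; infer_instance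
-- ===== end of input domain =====

-- B rewrites A's backward index loop with in-place pop/insert as a single forward recursion that
-- splits each block at the start of its trailing orphan run (objective: simpler). A mutates the
-- inner lists in place; B builds new lists — the equivalence proved here is about the return value.

-- ===== PORT A =====
def ORPHAN_WORDS : PySem.Set String := PySem.Set.ofList [
  "the","a","an","of","in","to","for","on","at","by","with","from","into","upon","about","above","after","against","along","among","around","before","behind","below","beneath","beside","between","beyond","down","during","except","inside","near","off","out","outside","over","through","under","until","without",
  "and","but","not","so","or","if","as","than","then","because","since","although","though","unless","while","where","when","why","how",
  "it","its","that","this","these","those","they","he","she","we","you","me","him","her","us","them","my","your","yours","our","ours","their","theirs","whose","which","what","some","any","every","all","both","neither","either","no",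
  "is","are","was","were","am","be","been","being","do","did","does","has","had","have",
  "can","could","shall","should","will","would","may","might","must",
  "it's","i'm","don't","won't","can't","isn't","aren't","you're","he's","she's","we're","they're","i've","you've","we've","they've","i'll","you'll","he'll","she'll","we'll","they'll","i'd","you'd","he'd","she'd","we'd","they'd","that's","who's","what's","where's","there's","here's","couldn't","shouldn't","wouldn't","hasn't","haven't","hadn't","doesn't","didn't","wasn't","weren't",
  "في","من","إلى","على","عن","و","ف","ب","ل","ك","ال","هل","لم","لن","قد","ما","أن","إن","هو","هي","هم",
  "أو","ثم","حتى","لكن","بين","مع","عند","مثل","هذا","هذه","ذلك","تلك","كل","بعض","غير","إلا"]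

-- _is_orphan(word): word.strip('",.!?;:()\'"…').lower() in ORPHAN_WORDS
def is_orphan_py (word : String) : Bool :=
  PySem.Set.contains ORPHAN_WORDS (PySem.Str.lower (PySem.Str.stripChars word "\",.!?;:()'\"…"))

-- dict lookup d["text"] on the association list (first match)
def lookupText (d : List (String × String)) : Option String :=
  (d.find? (fun p => p.1 == "text")).map (·.2)

-- the test '_is_orphan(words[idx]["text"])'; false where Python would raise
-- (IndexError / KeyError) — those inputs are excluded by Pre_ below
def checkOrphan (words : List (List (String × String))) (idx : Int) : Bool :=
  match PySem.List.pyGet? words idx with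
  | none => false
  | some d =>
    match lookupText d with
    | none => false
    | some t => is_orphan_py t

-- words[idx]["text"] exists (used only by Pre_)
def validIdx (words : List (List (String × String))) (idx : Int) : Bool :=
  ((PySem.List.pyGet? words idx).bind lookupText).isSome

-- the 'while len(blocks[i]) > 1 and _is_orphan(...)' loop: pops blocks[i][-1], inserts it at
-- the front of nxt (= blocks[i+1]); pop() on a list the guard knows is nonempty = last + dropLast
def whileA (words : List (List (String × String))) (b nxt : List Int) : List Int × List Int :=
  if h : 1 < b.length ∧ checkOrphan words (PySem.List.pyGetD b (-1) 0) = true then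
    whileA words b.dropLast (PySem.List.insert nxt 0 (PySem.List.pyGetD b (-1) 0))
  else (b, nxt)
termination_by b.length
decreasing_by simp [List.length_dropLast]; omega

def fix_trailing_orphans_py (blocks : List (List Int)) (words : List (List (String × String))) : List (List Int) :=
  if blocks.length ≤ 1 then blocks
  else
    -- for i in range(len(blocks) - 2, -1, -1): … (every i produced is ≥ 0, so .toNat is exact)
    let bs := (PySem.List.pyRange ((blocks.length : Int) - 2) (-1) (-1)).foldl
      (fun bs i =>
        let r := whileA words (bs.getD i.toNat []) (bs.getD (i.toNat + 1) [])
        (bs.set i.toNat r.1).set (i.toNat + 1) r.2) blocks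
    bs.filter (fun b => !b.isEmpty)

-- ===== PORT B =====
-- Source B builds the same set from one space-separated string: frozenset("…".split())
def ORPHAN_WORDS_alt : PySem.Set String := PySem.Set.ofList
  (PySem.Str.split₀ "the a an of in to for on at by with from into upon about above after against along among around before behind below beneath beside between beyond down during except inside near off out outside over through under until without and but not so or if as than then because since although though unless while where when why how it its that this these those they he she we you me him her us them my your yours our ours their theirs whose which what some any every all both neither either no is are was were am be been being do did does has had have can could shall should will would may might must it's i'm don't won't can't isn't aren't you're he's she's we're they're i've you've we've they've i'll you'll he'll she'll we'll they'll i'd you'd he'd she'd we'd they'd that's who's what's where's there's here's couldn't shouldn't wouldn't hasn't haven't hadn't doesn't didn't wasn't weren't في من إلى على عن و ف ب ل ك ال هل لم لن قد ما أن إن هو هي هم أو ثم حتى لكن بين مع عند مثل هذا هذه ذلك تلك كل بعض غير إلا")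

def is_orphan_alt (word : String) : Bool :=
  PySem.Set.contains ORPHAN_WORDS_alt (PySem.Str.lower (PySem.Str.stripChars word "\",.!?;:()'\"…"))

def lookupText_alt (d : List (String × String)) : Option String :=
  (d.find? (fun p => p.1 == "text")).map (·.2)

-- the test '_is_orphan(words[idx]["text"])' as Source B runs it; false where Python would raise
def checkOrphan_alt (words : List (List (String × String))) (idx : Int) : Bool :=
  match PySem.List.pyGet? words idx with
  | none => false
  | some d =>
    match lookupText_alt d with
    | none => false
    | some t => is_orphan_alt t

-- s = len(b); while s > 1 and _is_orphan(words[b[s-1]]["text"]): s -= 1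
def splitB (words : List (List (String × String))) (b : List Int) (s : Nat) : Nat :=
  if 1 < s ∧ checkOrphan_alt words (PySem.List.pyGetD b ((s : Int) - 1) 0) = true then
    splitB words b (s - 1)
  else s
termination_by s
decreasing_by omega

-- _shift(moved, blocks, words): forward recursion over the blocks
def shiftB (words : List (List (String × String))) (moved : List Int) : List (List Int) → List (List Int)
  | [] => []        -- unreachable: the Python recursion always receives a nonempty list
  | [b] => [moved ++ b]
  | b :: b2 :: rest =>
    let s := splitB words b b.length
    (moved ++ PySem.List.slice b none (some (s : Int))) ::
      shiftB words (PySem.List.slice b (some (s : Int)) none) (b2 :: rest)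

def fix_trailing_orphans_py_alt (blocks : List (List Int)) (words : List (List (String × String))) : List (List Int) :=
  if blocks.length ≤ 1 then blocks
  else (shiftB words [] blocks).filter (fun b => !b.isEmpty)

-- ===== PRECONDITION & SPEC =====
-- Pre_ excludes exactly the inputs on which the Python A raises (IndexError/KeyError): whenever the
-- backward while-loop would test index k of block i (k ≥ 1 and every later entry of the block is a
-- valid orphan reference), words[blocks[i][k]]["text"] must exist.
def Pre_fix_trailing_orphans_py (blocks : List (List Int)) (words : List (List (String × String))) : Prop :=
  ∀ i, i < blocks.length - 1 →
    ∀ k, k < (blocks.getD i []).length → 1 ≤ k →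
      (∀ j, j < (blocks.getD i []).length → k < j →
        checkOrphan words ((blocks.getD i []).getD j 0) = true) →
      validIdx words ((blocks.getD i []).getD k 0) = true
instance (blocks : List (List Int)) (words : List (List (String × String))) : Decidable (Pre_fix_trailing_orphans_py blocks words) := by unfold Pre_fix_trailing_orphans_py; infer_instance

def pvWitness_fix_trailing_orphans_py : List (List Int) × (List (List (String × String))) :=
  ([[0], [0]], [[("text", "hello")]])

def Spec_fix_trailing_orphans_py (blocks : List (List Int)) (words : List (List (String × String))) (out : List (List Int)) : Prop := out = fix_trailing_orphans_py_alt blocks words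
instance (blocks : List (List Int)) (words : List (List (String × String))) (out : List (List Int)) : Decidable (Spec_fix_trailing_orphans_py blocks words out) := by unfold Spec_fix_trailing_orphans_py; infer_instance

-- ===== CLAIM (what is proved, stated in full; the proofs are below) =====
def Claim_equal_fix_trailing_orphans_py : Prop := ∀ (blocks : List (List Int)) (words : List (List (String × String))), Dom_fix_trailing_orphans_py blocks words → Pre_fix_trailing_orphans_py blocks words → Spec_fix_trailing_orphans_py blocks words (fix_trailing_orphans_py blocks words)

-- ===== LEMMAS AND PROOFS =====

-- Source B's split-built word set is the same set as A's literal one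
set_option maxRecDepth 100000 in
set_option maxHeartbeats 2000000 in
theorem orphan_words_alt_eq : ORPHAN_WORDS_alt = ORPHAN_WORDS := by decide

theorem checkOrphan_alt_eq (words : List (List (String × String))) (idx : Int) :
    checkOrphan_alt words idx = checkOrphan words idx := by
  unfold checkOrphan_alt checkOrphan is_orphan_alt is_orphan_py lookupText_alt lookupText
  rw [orphan_words_alt_eq]

theorem splitB_le (words : List (List (String × String))) (b : List Int) (s : Nat) :
    splitB words b s ≤ s := by
  fun_induction splitB words b s <;> omega
theorem whileA_eq_splitB (words : List (List (String × String))) (b : List Int) (s : Nat)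
    (hs : s ≤ b.length) (nxt : List Int) :
    whileA words (b.take s) nxt =
      (b.take (splitB words b s), (b.take s).drop (splitB words b s) ++ nxt) := by
  induction s using Nat.strong_induction_on generalizing nxt with
  | _ s ih =>
  rw [whileA, splitB]
  simp only [checkOrphan_alt_eq]
  have hlen : (b.take s).length = s := by simp; omega
  by_cases h1 : 1 < s
  · have hne : b.take s ≠ [] := by
      intro hc; rw [hc] at hlen; simp at hlen; omega
    have hget : PySem.List.pyGetD (b.take s) (-1) 0 = b.getD (s-1) 0 := by
      rw [PySem.List.pyGetD_neg_one _ _ hne, List.getLast_eq_getElem, List.getElem_take,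
        List.getD_eq_getElem _ _ (by omega)]
      congr 1; omega
    have hget2 : PySem.List.pyGetD b ((s : Int) - 1) 0 = b.getD (s-1) 0 := by
      have : (s : Int) - 1 = ((s - 1 : Nat) : Int) := by omega
      rw [this, PySem.List.pyGetD_natCast]
    rw [hget, hget2, hlen]
    by_cases h2 : checkOrphan words (b.getD (s-1) 0) = true
    · rw [dif_pos ⟨h1, h2⟩, if_pos ⟨h1, h2⟩]
      have hdl : (b.take s).dropLast = b.take (s-1) := by
        rw [List.dropLast_eq_take, List.take_take, List.length_take]; congr 1; omega
      rw [hdl, PySem.List.insert_zero, ih (s-1) (by omega) (by omega)]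
      have hsp : b.take s = b.take (s-1) ++ [b.getD (s-1) 0] := by
        have h' : s - 1 + 1 = s := by omega
        rw [← h', List.take_add_one]
        simp [List.getElem?_eq_getElem (by omega : s - 1 < b.length), List.getD]
      have hle : splitB words b (s-1) ≤ s - 1 := splitB_le _ _ _
      rw [hsp, List.drop_append_of_le_length (by simp; omega)]
      simp
    · rw [dif_neg (by rintro ⟨-, hc⟩; exact h2 hc), if_neg (by rintro ⟨-, hc⟩; exact h2 hc)]
      simp [List.drop_eq_nil_of_le, hlen]
  · rw [dif_neg (by rintro ⟨hc, -⟩; omega), if_neg (by rintro ⟨hc, -⟩; omega)]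
    simp [List.drop_eq_nil_of_le, hlen]

theorem whileA_eq (words : List (List (String × String))) (b nxt : List Int) :
    whileA words b nxt =
      (b.take (splitB words b b.length), b.drop (splitB words b b.length) ++ nxt) := by
  have h := whileA_eq_splitB words b b.length le_rfl nxt
  simpa using h

theorem step_inv (words : List (List (String × String))) (blocks : List (List Int)) (j : Nat)
    (hj : j + 1 < blocks.length) :
    (((blocks.take (j + 1) ++ shiftB words [] (blocks.drop (j + 1))).set j
        (whileA words ((blocks.take (j + 1) ++ shiftB words [] (blocks.drop (j + 1))).getD j [])
          ((blocks.take (j + 1) ++ shiftB words [] (blocks.drop (j + 1))).getD (j + 1) [])).1).set (j + 1)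
      (whileA words ((blocks.take (j + 1) ++ shiftB words [] (blocks.drop (j + 1))).getD j [])
          ((blocks.take (j + 1) ++ shiftB words [] (blocks.drop (j + 1))).getD (j + 1) [])).2) =
    blocks.take j ++ shiftB words [] (blocks.drop j) := by
  have hjlen : (blocks.take (j+1)).length = j + 1 := by simp; omega
  have hb : blocks.drop j = blocks[j] :: blocks.drop (j+1) := by
    rw [List.drop_eq_getElem_cons (by omega)]
  obtain ⟨c, rest, hdrop⟩ : ∃ c rest, blocks.drop (j+1) = c :: rest := by
    have : blocks.drop (j+1) ≠ [] := by simp; omega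
    cases h : blocks.drop (j+1) with
    | nil => exact absurd h this
    | cons c rest => exact ⟨c, rest, rfl⟩
  have hj' : j < blocks.length := by omega
  have hlj : (blocks.take j).length = j := by simp; omega
  have htake : blocks.take (j+1) = blocks.take j ++ [blocks[j]] := by
    rw [List.take_add_one, List.getElem?_eq_getElem hj']; simp
  have hbj : blocks.drop j = blocks[j] :: c :: rest := by
    rw [hb, hdrop]
  set T := shiftB words [] (blocks.drop (j+1)) with hT
  have hget1 : (blocks.take (j+1) ++ T).getD j [] = blocks[j] := by
    rw [htake, List.append_assoc, List.getD_append_right _ _ _ _ (by omega)]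
    simp [hlj]
  have hget2 : (blocks.take (j+1) ++ T).getD (j+1) [] = T.getD 0 [] := by
    rw [List.getD_append_right _ _ _ _ (by omega)]
    congr 1; omega
  have hsets : ∀ v w, ((blocks.take (j+1) ++ T).set j v).set (j+1) w
      = blocks.take j ++ v :: T.set 0 w := by
    intro v w
    rw [htake, List.append_assoc, List.set_append_right _ _ (by omega),
      List.set_append_right _ _ (by omega)]
    simp [hlj]
  rw [hbj]
  cases rest with
  | nil =>
    have hTv : T = [c] := by rw [hT, hdrop]; simp [shiftB]
    simp only [hget1, hget2, whileA_eq, hsets]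
    rw [hTv]
    simp [shiftB]
  | cons r2 rs =>
    have hTv : T = (c.take (splitB words c c.length)) ::
        shiftB words (c.drop (splitB words c c.length)) (r2 :: rs) := by
      rw [hT, hdrop]; simp [shiftB]
    simp only [hget1, hget2, whileA_eq, hsets]
    rw [hTv]
    simp [shiftB]

theorem fold_inv (words : List (List (String × String))) (blocks : List (List Int)) (j : Nat)
    (hj : j < blocks.length - 1) :
    (PySem.List.pyRange (j : Int) (-1) (-1)).foldl
      (fun bs (i : Int) =>
        let r := whileA words (bs.getD i.toNat []) (bs.getD (i.toNat + 1) [])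
        (bs.set i.toNat r.1).set (i.toNat + 1) r.2)
      (blocks.take (j + 1) ++ shiftB words [] (blocks.drop (j + 1))) =
    shiftB words [] blocks := by
  induction j with
  | zero =>
    rw [PySem.List.pyRange_neg_one_cons (by norm_num), PySem.List.pyRange_neg_one_eq_nil (by norm_num)]
    simp only [List.foldl_cons, List.foldl_nil, Int.toNat_natCast]
    rw [step_inv words blocks 0 (by omega)]
    simp
  | succ j ih =>
    rw [PySem.List.pyRange_neg_one_cons (by push_cast; omega)]
    simp only [List.foldl_cons, Int.toNat_natCast]
    rw [step_inv words blocks (j + 1) (by omega),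
      show ((j + 1 : Nat) : Int) - 1 = ((j : Nat) : Int) by push_cast; ring]
    exact ih (by omega)

theorem main_eq (blocks : List (List Int)) (words : List (List (String × String))) :
    (if blocks.length ≤ 1 then blocks
     else
       ((PySem.List.pyRange ((blocks.length : Int) - 2) (-1) (-1)).foldl
         (fun bs (i : Int) =>
           let r := whileA words (bs.getD i.toNat []) (bs.getD (i.toNat + 1) [])
           (bs.set i.toNat r.1).set (i.toNat + 1) r.2) blocks).filter (fun b => !b.isEmpty)) =
    (if blocks.length ≤ 1 then blocks
     else (shiftB words [] blocks).filter (fun b => !b.isEmpty)) := by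
  by_cases hle : blocks.length ≤ 1
  · simp [hle]
  · rw [if_neg hle, if_neg hle]
    congr 1
    have hn : 2 ≤ blocks.length := by omega
    obtain ⟨x, hx⟩ : ∃ x, blocks.drop (blocks.length - 1) = [x] := by
      have hlen : (blocks.drop (blocks.length - 1)).length = 1 := by simp; omega
      cases h : blocks.drop (blocks.length - 1) with
      | nil => rw [h] at hlen; simp at hlen
      | cons y ys =>
        rw [h] at hlen; simp at hlen
        exact ⟨y, by rw [hlen]⟩
    have hinit : blocks = blocks.take (blocks.length - 2 + 1) ++
        shiftB words [] (blocks.drop (blocks.length - 2 + 1)) := by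
      rw [show blocks.length - 2 + 1 = blocks.length - 1 by omega, hx]
      simp [shiftB]
      rw [← hx, List.take_append_drop]
    rw [show (blocks.length : Int) - 2 = ((blocks.length - 2 : Nat) : Int) by omega]
    calc _ = (PySem.List.pyRange ((blocks.length - 2 : Nat) : Int) (-1) (-1)).foldl
            (fun bs (i : Int) =>
              let r := whileA words (bs.getD i.toNat []) (bs.getD (i.toNat + 1) [])
              (bs.set i.toNat r.1).set (i.toNat + 1) r.2)
            (blocks.take (blocks.length - 2 + 1) ++ shiftB words [] (blocks.drop (blocks.length - 2 + 1))) := by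
          rw [← hinit]
      _ = shiftB words [] blocks := fold_inv words blocks (blocks.length - 2) (by omega)

-- ===== VERDICT (by name: the statement is the Claim_ definition above) =====
theorem fix_trailing_orphans_py_spec : Claim_equal_fix_trailing_orphans_py := by
  intro blocks words _ _
  unfold Spec_fix_trailing_orphans_py
  simp only [fix_trailing_orphans_py, fix_trailing_orphans_py_alt]
  exact main_eq blocks words
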